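-- pv_equiv track=rewrite | github.com/servaltullius/calamity-reactive-loot-affixes | scripts/vibe_kit/brain/check_boundaries.py | _apply_js_alias
-- ===== SOURCE A (Python) =====
-- def _apply_js_alias(spec: str, aliases: dict[str, str]) -> str:
--     if not aliases:
--         return spec
--     best_k = None
--     for k in aliases:
--         if spec.startswith(k) and (best_k is None or len(k) > len(best_k)):
--             best_k = k
--     if best_k is None:
--         return spec
--     prefix = aliases[best_k].rstrip("/") + "/"
--     rest = spec[len(best_k) :].lstrip("/")
--     return prefix + rest
-- ===== SOURCE B (Python) =====
-- def _apply_js_alias(spec: str, aliases: dict[str, str]) -> str: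
--     if not aliases:
--         return spec
--     top = min(len(spec), max(map(len, aliases)))
--     for L in range(top, -1, -1):
--         cand = spec[:L]
--         if cand in aliases:
--             prefix = aliases[cand].rstrip("/") + "/"
--             rest = spec[L:].lstrip("/")
--             return prefix + rest
--     return spec
-- ===== Notes on version B (the rewrite author's own statement) =====
-- stated objective: idiomatic
-- what changed: A scans every alias key keeping the longest one that prefixes spec; B iterates over spec's prefixes from longest to shortest (bounded by the longest key) and returns on the first dict hit, removing the best-so-far accumulator.
import Mathlib
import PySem

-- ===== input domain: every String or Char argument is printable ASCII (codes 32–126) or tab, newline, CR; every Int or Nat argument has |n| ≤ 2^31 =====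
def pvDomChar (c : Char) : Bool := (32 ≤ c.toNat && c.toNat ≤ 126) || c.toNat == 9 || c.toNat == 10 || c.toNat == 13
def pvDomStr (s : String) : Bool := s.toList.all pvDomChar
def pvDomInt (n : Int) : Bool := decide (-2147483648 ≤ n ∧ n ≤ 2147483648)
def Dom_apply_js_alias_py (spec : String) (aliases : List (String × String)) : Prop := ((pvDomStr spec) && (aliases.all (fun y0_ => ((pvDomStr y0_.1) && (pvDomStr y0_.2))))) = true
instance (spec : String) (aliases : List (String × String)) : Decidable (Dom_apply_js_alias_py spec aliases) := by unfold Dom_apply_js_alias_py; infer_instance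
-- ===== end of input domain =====

-- B replaces A's scan over all alias keys (keeping the longest matching one) by a descending
-- scan over spec's prefixes with a dict-membership test that stops at the first (longest) hit;
-- objective: idiomatic, no best-so-far accumulator.

-- s.rstrip("/")  (exact hand port: drop trailing '/' characters)
def pvRstripSlash (s : String) : String :=
  String.ofList ((s.toList.reverse.dropWhile (fun c => c == '/')).reverse)

-- s.lstrip("/")  (exact hand port: drop leading '/' characters)
def pvLstripSlash (s : String) : String :=
  String.ofList (s.toList.dropWhile (fun c => c == '/'))

-- ===== PORT A =====
-- the body of A's for-loop: best_k is updated when k is a prefix of spec and strictly longer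
def pvBestStep (spec : String) (b : Option String) (k : String) : Option String :=
  if PySem.Str.startswith spec k &&
      (match b with
       | none => true
       | some bk => decide (bk.toList.length < k.toList.length))
  then some k else b

def apply_js_alias_py (spec : String) (aliases : List (String × String)) : String :=
  if aliases = [] then spec
  else
    let d := PySem.Dict.ofList aliases
    match d.keys.foldl (pvBestStep spec) none with
    | none => spec
    | some k =>
      -- prefix = aliases[best_k].rstrip("/") + "/" ; rest = spec[len(best_k):].lstrip("/")
      -- spec[L:] with L = len(best_k) ≥ 0 is exactly drop L
      String.ofList ((pvRstripSlash (d.getD k "")).toList ++ '/' ::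
        (pvLstripSlash (String.ofList (spec.toList.drop k.toList.length))).toList)

-- ===== PORT B =====
-- B's for-loop over L = len(spec), …, 0: the first prefix spec[:L] that is a key wins
def pvLoopB (spec : String) (d : PySem.Dict String String) (L : Nat) : String :=
  let cand := String.ofList (spec.toList.take L)
  if d.contains cand then
    String.ofList ((pvRstripSlash (d.getD cand "")).toList ++ '/' ::
      (pvLstripSlash (String.ofList (spec.toList.drop L))).toList)
  else
    match L with
    | 0 => spec
    | Nat.succ L' => pvLoopB spec d L'

def apply_js_alias_py_alt (spec : String) (aliases : List (String × String)) : String :=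
  if aliases = [] then spec
  else
    -- top = min(len(spec), max(map(len, aliases))); max over the nonempty list is a
    -- binary-max fold, started at 0 (exact: lengths are ≥ 0)
    let top := Nat.min spec.toList.length
      ((aliases.map (fun p => p.1.toList.length)).foldl Nat.max 0)
    pvLoopB spec (PySem.Dict.ofList aliases) top

-- ===== PRECONDITION & SPEC =====
def Spec_apply_js_alias_py (spec : String) (aliases : List (String × String)) (out : String) : Prop := out = apply_js_alias_py_alt spec aliases
instance (spec : String) (aliases : List (String × String)) (out : String) : Decidable (Spec_apply_js_alias_py spec aliases out) := by unfold Spec_apply_js_alias_py; infer_instance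

-- ===== CLAIM (what is proved, stated in full; the proofs are below) =====
def Claim_equal_apply_js_alias_py : Prop := ∀ (spec : String) (aliases : List (String × String)), Dom_apply_js_alias_py spec aliases → Spec_apply_js_alias_py spec aliases (apply_js_alias_py spec aliases)

-- ===== LEMMAS AND PROOFS =====

-- proof-only abbreviation: "k is a prefix key candidate"
def pvP (spec k : String) : Prop := PySem.Str.startswith spec k = true

theorem pvStep_none (spec k : String) :
    pvBestStep spec none k = if PySem.Str.startswith spec k then some k else none := by
  simp [pvBestStep]

theorem pvStep_some (spec k bk : String) :
    pvBestStep spec (some bk) k =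
      if PySem.Str.startswith spec k && decide (bk.toList.length < k.toList.length)
      then some k else some bk := by
  simp [pvBestStep]

-- every spec-prefix is a candidate
theorem pvP_take (spec : String) (L : Nat) : pvP spec (String.ofList (spec.toList.take L)) := by
  simp [pvP, PySem.Chars.startswith_iff, List.take_prefix]

-- characterisation of A's fold: result is a key, is a prefix, and has maximal length
theorem pvFold_char (spec : String) (ks : List String) :
    ∀ b : Option String,
      (∀ bk, b = some bk → pvP spec bk) →
      ((∀ rk, ks.foldl (pvBestStep spec) b = some rk → pvP spec rk ∧ (rk ∈ ks ∨ b = some rk)) ∧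
       (ks.foldl (pvBestStep spec) b = none → b = none ∧ ∀ k ∈ ks, ¬ pvP spec k) ∧
       (∀ bk, b = some bk → ∃ rk, ks.foldl (pvBestStep spec) b = some rk ∧ bk.toList.length ≤ rk.toList.length) ∧
       (∀ k ∈ ks, pvP spec k → ∃ rk, ks.foldl (pvBestStep spec) b = some rk ∧ k.toList.length ≤ rk.toList.length)) := by
  induction ks with
  | nil =>
    intro b hb
    refine ⟨fun rk hr => ⟨hb rk hr, Or.inr hr⟩, fun h => ⟨h, by simp⟩,
      fun bk hbk => ⟨bk, hbk, le_refl _⟩, by simp⟩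
  | cons k ks ih =>
    rintro (_ | ⟨bk0⟩) hb
    · -- b = none
      simp only [List.foldl_cons, pvStep_none]
      by_cases hPk : PySem.Str.startswith spec k = true
      · rw [if_pos hPk]
        obtain ⟨ih1, ih2, ih3, ih4⟩ := ih (some k) (by rintro _ ⟨rfl⟩; exact hPk)
        refine ⟨?_, ?_, by simp, ?_⟩
        · intro rk hr
          obtain ⟨hp, hm⟩ := ih1 rk hr
          refine ⟨hp, Or.inl ?_⟩
          rcases hm with hm | hm
          · exact List.mem_cons_of_mem _ hm
          · cases hm; exact List.mem_cons_self
        · intro hr; exact absurd (ih2 hr).1 (by simp)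
        · intro k' hk' hp
          rcases List.mem_cons.mp hk' with rfl | h
          · exact ih3 k' rfl
          · exact ih4 k' h hp
      · rw [if_neg hPk]
        obtain ⟨ih1, ih2, ih3, ih4⟩ := ih none (by simp)
        refine ⟨?_, ?_, by simp, ?_⟩
        · intro rk hr
          obtain ⟨hp, hm⟩ := ih1 rk hr
          rcases hm with hm | hm
          · exact ⟨hp, Or.inl (List.mem_cons_of_mem _ hm)⟩
          · cases hm
        · intro hr
          refine ⟨by simp, ?_⟩
          intro k' hk'
          rcases List.mem_cons.mp hk' with rfl | h
          · exact fun hp => hPk hp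
          · exact (ih2 hr).2 k' h
        · intro k' hk' hp
          rcases List.mem_cons.mp hk' with rfl | h
          · exact absurd hp hPk
          · exact ih4 k' h hp
    · -- b = some bk0
      have hPb : pvP spec bk0 := hb bk0 rfl
      simp only [List.foldl_cons, pvStep_some]
      by_cases hc : (PySem.Str.startswith spec k && decide (bk0.toList.length < k.toList.length)) = true
      · rw [if_pos hc]
        have hPk : pvP spec k := (Bool.and_eq_true _ _ ▸ hc).1
        have hlt : bk0.toList.length < k.toList.length := by
          have := (Bool.and_eq_true _ _ ▸ hc).2; simpa using this
        obtain ⟨ih1, ih2, ih3, ih4⟩ := ih (some k) (by rintro _ ⟨rfl⟩; exact hPk)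
        refine ⟨?_, ?_, ?_, ?_⟩
        · intro rk hr
          obtain ⟨hp, hm⟩ := ih1 rk hr
          refine ⟨hp, Or.inl ?_⟩
          rcases hm with hm | hm
          · exact List.mem_cons_of_mem _ hm
          · cases hm; exact List.mem_cons_self
        · intro hr; exact absurd (ih2 hr).1 (by simp)
        · rintro _ ⟨rfl⟩
          obtain ⟨rk, hrk, hlen⟩ := ih3 k rfl
          exact ⟨rk, hrk, by omega⟩
        · intro k' hk' hp
          rcases List.mem_cons.mp hk' with rfl | h
          · exact ih3 k' rfl
          · exact ih4 k' h hp
      · rw [if_neg hc]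
        obtain ⟨ih1, ih2, ih3, ih4⟩ := ih (some bk0) (by rintro _ ⟨rfl⟩; exact hPb)
        refine ⟨?_, ?_, ?_, ?_⟩
        · intro rk hr
          obtain ⟨hp, hm⟩ := ih1 rk hr
          rcases hm with hm | hm
          · exact ⟨hp, Or.inl (List.mem_cons_of_mem _ hm)⟩
          · exact ⟨hp, Or.inr hm⟩
        · intro hr; exact absurd (ih2 hr).1 (by simp)
        · rintro _ ⟨rfl⟩; exact ih3 bk0 rfl
        · intro k' hk' hp
          rcases List.mem_cons.mp hk' with rfl | h
          · have hge : k'.toList.length ≤ bk0.toList.length := by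
              rw [Bool.and_eq_true] at hc
              push Not at hc
              have h2 := hc hp
              rw [Ne, decide_eq_true_iff] at h2
              omega
            obtain ⟨rk, hrk, hlen⟩ := ih3 bk0 rfl
            exact ⟨rk, hrk, by omega⟩
          · exact ih4 k' h hp

-- a key of Dict.ofList ps is a first component of ps
theorem pvMemKeysOfList (ps : List (String × String)) (k : String)
    (h : k ∈ (PySem.Dict.ofList ps).keys) : k ∈ ps.map Prod.fst := by
  have he : PySem.Dict.ofList ps = ps.foldl (fun d p => d.insert p.1 p.2) PySem.Dict.empty := rfl
  rw [he, PySem.Dict.keys_foldl_insert_key] at h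
  rw [PySem.Dict.keys_empty] at h
  rw [PySem.Set.update_nil_left] at h
  exact (PySem.Set.mem_ofList _ _).mp h

theorem pvFoldlMaxLeBase (l : List Nat) : ∀ a, a ≤ l.foldl Nat.max a := by
  induction l with
  | nil => simp
  | cons y l ih => intro a; exact le_trans (Nat.le_max_left a y) (ih _)

theorem pvLeFoldlMax (l : List Nat) : ∀ (a x : Nat), x ∈ l → x ≤ l.foldl Nat.max a := by
  induction l with
  | nil => simp
  | cons y l ih =>
    intro a x hx
    rcases List.mem_cons.mp hx with rfl | h
    · exact le_trans (Nat.le_max_right a x) (pvFoldlMaxLeBase l _)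
    · exact ih _ x h

-- B's loop skips every L' with no key hit, down to m
theorem pvLoop_descend (spec : String) (d : PySem.Dict String String) :
    ∀ L m : Nat, m ≤ L →
      (∀ L', m < L' → L' ≤ L → d.contains (String.ofList (spec.toList.take L')) = false) →
      pvLoopB spec d L = pvLoopB spec d m := by
  intro L
  induction L with
  | zero => intro m hm _; interval_cases m; rfl
  | succ L ih =>
    intro m hm hno
    rcases Nat.eq_or_lt_of_le hm with h | h
    · rw [h]
    · have hm' : m ≤ L := by omega
      have hc : d.contains (String.ofList (spec.toList.take (L+1))) = false :=
        hno (L+1) (by omega) (by omega)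
      rw [pvLoopB]
      simp only [hc, if_false, Bool.false_eq_true]
      exact ih m hm' (fun L' h1 h2 => hno L' h1 (by omega))

-- if no prefix at all is a key, B's loop returns spec
theorem pvLoop_none (spec : String) (d : PySem.Dict String String) :
    ∀ L : Nat, (∀ L', L' ≤ L → d.contains (String.ofList (spec.toList.take L')) = false) →
      pvLoopB spec d L = spec := by
  intro L
  induction L with
  | zero =>
    intro h
    rw [pvLoopB]
    simp only [h 0 (by omega), Bool.false_eq_true, if_false]
  | succ L ih =>
    intro h
    rw [pvLoopB]
    simp only [h (L+1) (by omega), Bool.false_eq_true, if_false]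
    exact ih (fun L' hL' => h L' (by omega))

-- ===== VERDICT (by name: the statement is the Claim_ definition above) =====
theorem apply_js_alias_py_spec : Claim_equal_apply_js_alias_py := by
  intro spec aliases _
  unfold Spec_apply_js_alias_py
  by_cases ha : aliases = []
  · simp [apply_js_alias_py, apply_js_alias_py_alt, ha]
  · simp only [apply_js_alias_py, apply_js_alias_py_alt, if_neg ha]
    set d := PySem.Dict.ofList aliases with hd
    set top := Nat.min spec.toList.length
      ((aliases.map (fun p => p.1.toList.length)).foldl Nat.max 0) with htopdef
    have htn : top ≤ spec.toList.length := Nat.min_le_left _ _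
    obtain ⟨c1, c2, c3, c4⟩ := pvFold_char spec d.keys none (by simp)
    cases hr : d.keys.foldl (pvBestStep spec) none with
    | none =>
      rw [pvLoop_none spec d top ?_]
      intro L' _
      by_contra hcon
      have hmem : String.ofList (spec.toList.take L') ∈ d.keys :=
        (PySem.Dict.contains_iff_mem_keys d _).mp (by
          cases hcv : d.contains (String.ofList (spec.toList.take L'))
          · exact absurd hcv hcon
          · rfl)
      exact (c2 hr).2 _ hmem (pvP_take spec L')
    | some k =>
      obtain ⟨hPk, hmk⟩ := c1 k hr
      have hkmem : k ∈ d.keys := by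
        rcases hmk with h | h
        · exact h
        · cases h
      have hpre : k.toList <+: spec.toList := by
        have := hPk
        simp only [pvP, PySem.Str.startswith_eq] at this
        exact (PySem.Chars.startswith_iff _ _).mp this
      obtain ⟨t, ht⟩ := hpre
      have hlen : k.toList.length ≤ spec.toList.length := by
        rw [← ht]; simp
      have htake : spec.toList.take k.toList.length = k.toList := by
        rw [← ht]; simp
      have hktop : k.toList.length ≤ top := by
        refine le_min hlen ?_
        refine pvLeFoldlMax _ 0 _ ?_
        have hmf : k ∈ aliases.map Prod.fst := pvMemKeysOfList aliases k hkmem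
        obtain ⟨p, hp, hpk⟩ := List.mem_map.mp hmf
        exact List.mem_map.mpr ⟨p, hp, by rw [hpk]⟩
      rw [pvLoop_descend spec d top k.toList.length hktop ?_]
      · rw [pvLoopB.eq_def]
        have hck : d.contains (String.ofList (spec.toList.take k.toList.length)) = true := by
          rw [htake]
          simp only [String.ofList_toList]
          exact (PySem.Dict.contains_iff_mem_keys d k).mpr hkmem
        simp only [htake, String.ofList_toList]
        rw [if_pos ((PySem.Dict.contains_iff_mem_keys d k).mpr hkmem)]
      · intro L' h1 h2
        by_contra hcon
        have hcv : d.contains (String.ofList (spec.toList.take L')) = true := by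
          cases hcv : d.contains (String.ofList (spec.toList.take L'))
          · exact absurd hcv hcon
          · rfl
        have hmem : String.ofList (spec.toList.take L') ∈ d.keys :=
          (PySem.Dict.contains_iff_mem_keys d _).mp hcv
        obtain ⟨rk, hrk, hlrk⟩ := c4 _ hmem (pvP_take spec L')
        rw [hr] at hrk
        cases hrk
        have hL'n : L' ≤ spec.toList.length := le_trans h2 htn
        have hsl : spec.toList.length = spec.length := by simp
        have hlenL : (String.ofList (spec.toList.take L')).toList.length = L' := by
          simp [List.length_take]
          omega
        omega
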